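-- pv_equiv track=rewrite | github.com/janinadiers/ba-petrinet-recognizer | __tests__/test_grouper.py | has_duplicates
-- ===== SOURCE A (Python) =====
-- def has_duplicates(lists):
--     # Sortiere jede Liste in der Liste von Listen
--     sorted_lists = [sorted(sublist) for sublist in lists]
--
--     # Erstelle ein Set zum Überprüfen der Einzigartigkeit
--     seen = set()
--
--     for sublist in sorted_lists:
--         # Konvertiere jede sortierte Liste in ein Tuple, da Sets nur unveränderliche (hashable) Typen akzeptieren
--         sublist_tuple = tuple(sublist)
--
--         if sublist_tuple in seen:
--             # Wenn das Tuple bereits im Set ist, gibt es ein Duplikat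
--             return True
--
--         # Füge das Tuple zum Set hinzu
--         seen.add(sublist_tuple)
--
--     # Wenn keine Duplikate gefunden wurden, gib False zurück
--     return False
-- ===== SOURCE B (Python) =====
-- def has_duplicates(lists):
--     # Sort-then-adjacent-scan duplicate detection instead of a hash set:
--     # normalize each sublist to a sorted tuple, sort the keys, and a duplicate
--     # exists iff two equal keys end up adjacent.
--     keys = sorted(tuple(sorted(sublist)) for sublist in lists)
--     for a, b in zip(keys, keys[1:]):
--         if a == b:
--             return True
--     return False
-- ===== Notes on version B (the rewrite author's own statement) =====
-- stated objective: alternative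
-- what changed: Replaced the hash-set membership loop with a sort-then-adjacent-comparison scan over the normalized keys.
import Mathlib
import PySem

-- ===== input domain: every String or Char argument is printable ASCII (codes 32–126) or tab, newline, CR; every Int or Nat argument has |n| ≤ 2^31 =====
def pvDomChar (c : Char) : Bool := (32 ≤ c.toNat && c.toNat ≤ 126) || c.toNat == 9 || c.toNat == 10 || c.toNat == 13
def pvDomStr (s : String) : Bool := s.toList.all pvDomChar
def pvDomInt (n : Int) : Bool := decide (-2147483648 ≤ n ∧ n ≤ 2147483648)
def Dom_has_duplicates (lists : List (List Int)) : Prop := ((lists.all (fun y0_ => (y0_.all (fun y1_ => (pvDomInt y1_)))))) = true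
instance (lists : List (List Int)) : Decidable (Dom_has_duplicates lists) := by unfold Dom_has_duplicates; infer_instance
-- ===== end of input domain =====

-- B replaces A's hash-set membership loop with a sort-then-adjacent-scan over the normalized keys (alternative algorithm, same result).


-- ===== PORT A =====
-- the 'for sublist in sorted_lists' loop with early return, over the set 'seen'
def pySeenLoop (xs : List (List Int)) (seen : PySem.Set (List Int)) : Bool :=
  match xs with
  | [] => false
  | x :: t => if PySem.Set.contains seen x then true else pySeenLoop t (PySem.Set.add seen x)

def has_duplicates (lists : List (List Int)) : Bool :=
  let sorted_lists := lists.map (fun sublist => PySem.List.sorted sublist (fun x => x) false)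
  pySeenLoop sorted_lists PySem.Set.empty

-- ===== PORT B =====
-- the 'for a, b in zip(keys, keys[1:])' loop with early return
def adjEqScan : List (List Int) → Bool
  | a :: b :: t => if a == b then true else adjEqScan (b :: t)
  | _ => false

def has_duplicates_alt (lists : List (List Int)) : Bool :=
  let keys := PySem.List.sorted
      (lists.map (fun sublist => PySem.List.sorted sublist (fun x => x) false))
      (fun k => k) false
  adjEqScan keys

-- ===== PRECONDITION & SPEC =====
def Spec_has_duplicates (lists : List (List Int)) (out : Bool) : Prop := out = has_duplicates_alt lists
instance (lists : List (List Int)) (out : Bool) : Decidable (Spec_has_duplicates lists out) := by unfold Spec_has_duplicates; infer_instance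

-- ===== CLAIM (what is proved, stated in full; the proofs are below) =====
def Claim_equal_has_duplicates : Prop := ∀ (lists : List (List Int)), Dom_has_duplicates lists → Spec_has_duplicates lists (has_duplicates lists)

-- ===== LEMMAS AND PROOFS =====

-- the two List-order Decidable instances coincide (used to apply the sorted-order lemmas)
theorem decLT_eq : (fun (a b : List Int) => a.decidableLT b) = (LinearOrder.toDecidableLT : DecidableLT (List Int)) := by
  funext a b; exact Subsingleton.elim _ _

-- A's loop returns true iff some pending element was already seen, or the pending list has a duplicate
theorem pySeenLoop_iff (xs : List (List Int)) (seen : PySem.Set (List Int)) :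
    pySeenLoop xs seen = true ↔ (∃ y ∈ xs, y ∈ seen) ∨ ¬ xs.Nodup := by
  induction xs generalizing seen with
  | nil => simp [pySeenLoop]
  | cons x t ih =>
    simp only [pySeenLoop]
    by_cases hx : x ∈ seen
    · rw [if_pos ((PySem.Set.contains_iff seen x).mpr hx)]
      simp only [true_iff]
      exact Or.inl ⟨x, by simp, hx⟩
    · rw [if_neg (fun h => hx ((PySem.Set.contains_iff seen x).mp h)),
          ih, PySem.Set.add_of_not_mem hx]
      simp only [List.mem_append, List.mem_cons, List.not_mem_nil, or_false, List.nodup_cons]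
      constructor
      · rintro (⟨y, hy, hmem | rfl⟩ | hnd)
        · exact Or.inl ⟨y, Or.inr hy, hmem⟩
        · exact Or.inr (fun h => h.1 hy)
        · exact Or.inr (fun h => hnd h.2)
      · rintro (⟨y, rfl | hy, hmem⟩ | hnd)
        · exact absurd hmem hx
        · exact Or.inl ⟨y, hy, Or.inl hmem⟩
        · by_cases hxt : x ∈ t
          · exact Or.inl ⟨x, hxt, Or.inr rfl⟩
          · exact Or.inr fun hn => hnd ⟨hxt, hn⟩

-- B's adjacent scan on a ≤-sorted list returns true iff the list has a duplicate
theorem adjEqScan_iff (s : List (List Int)) (hs : s.Pairwise (· ≤ ·)) :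
    adjEqScan s = true ↔ ¬ s.Nodup := by
  induction s with
  | nil => simp [adjEqScan]
  | cons a t ih =>
    match t, hs with
    | [], _ => simp [adjEqScan]
    | b :: t', hs =>
      rw [List.pairwise_cons] at hs
      obtain ⟨hale, hs'⟩ := hs
      simp only [adjEqScan]
      by_cases hab : a = b
      · subst hab
        simp [List.nodup_cons]
      · rw [if_neg (by simpa using hab), ih hs']
        constructor
        · intro h hnd
          exact h (List.Nodup.of_cons hnd)
        · intro h
          by_contra hnd'
          apply h
          rw [List.nodup_cons]
          refine ⟨?_, by simpa using hnd'⟩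
          intro hmem
          rcases List.mem_cons.mp hmem with rfl | hmem'
          · exact hab rfl
          · have hba : b ≤ a := by
              rw [List.pairwise_cons] at hs'
              exact hs'.1 a hmem'
            exact hab (le_antisymm (hale b (by simp)) hba)

-- the two loops agree on the shared normalized-key list
theorem loops_agree (keys0 : List (List Int)) :
    pySeenLoop keys0 PySem.Set.empty = adjEqScan (PySem.List.sorted keys0 (fun k => k) false) := by
  have hA : pySeenLoop keys0 PySem.Set.empty = true ↔ ¬ keys0.Nodup := by
    rw [pySeenLoop_iff]
    simp [PySem.Set.empty]
  have hperm : (PySem.List.sorted keys0 (fun k => k) false).Perm keys0 :=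
    PySem.List.sorted_perm keys0 (fun k => k) false
  have hpw : (PySem.List.sorted keys0 (fun k => k) false).Pairwise (· ≤ ·) := by
    rw [decLT_eq]
    exact PySem.List.sorted_pairwise keys0 (fun k => k)
  rw [Bool.eq_iff_iff, hA, adjEqScan_iff _ hpw, hperm.nodup_iff]

-- ===== VERDICT (by name: the statement is the Claim_ definition above) =====
theorem has_duplicates_spec : Claim_equal_has_duplicates := by
  intro lists _
  show has_duplicates lists = has_duplicates_alt lists
  exact loops_agree (lists.map (fun sublist => PySem.List.sorted sublist (fun x => x) false))
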